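-- pv_equiv track=rewrite | github.com/linhdvu14/cp-sols | sols/CodeChef/LTIME103B/OPTSORT.py | solve
-- ===== SOURCE A (Python) =====
-- def solve(N, A):
--     SA = sorted(A)
--     first = {}
--     for i, a in enumerate(SA):
--         if a not in first: first[a] = i
--
--     # should reverse entire interval (orig pos, correct pos)
--     intervals = []
--     for i, a in enumerate(A):
--         intervals.append(sorted([i, first[a]]))
--     intervals.sort()
--
--     # merge then reverse
--     res = 0
--     start, end = intervals[0]
--     for s, e in intervals[1:]:
--         if s > end:
--             res += max(A[start:end+1]) - min(A[start:end+1])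
--             start, end = s, e
--         end = max(end, e)
--
--     res += max(A[start:end+1]) - min(A[start:end+1])
--     return res
-- ===== SOURCE B (Python) =====
-- def solve(N, A):
--     n = len(A)
--     SA = sorted(A)
--     first = {}
--     for i, a in enumerate(SA):
--         if a not in first:
--             first[a] = i
--     # M[s] = furthest index any displacement interval starting at s must cover
--     M = list(range(n))
--     for i, a in enumerate(A):
--         f = first[a]
--         lo, hi = (f, i) if f < i else (i, f)
--         if hi > M[lo]:
--             M[lo] = hi
--     # single sweep: close a block whenever the running reach equals the position
--     res = 0
--     reach = 0
--     bs = 0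
--     for p in range(n):
--         if M[p] > reach:
--             reach = M[p]
--         if reach == p:
--             res += max(A[bs:p+1]) - min(A[bs:p+1])
--             bs = p + 1
--     return res
-- ===== Notes on version B (the rewrite author's own statement) =====
-- stated objective: faster
-- what changed: Instead of materialising one interval per index, sorting that interval list and merging it pairwise, B stores for each start position s the furthest reach M[s] of any displacement interval starting there and closes blocks in a single left-to-right sweep whenever the running prefix-max of M equals the current position.
import Mathlib
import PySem

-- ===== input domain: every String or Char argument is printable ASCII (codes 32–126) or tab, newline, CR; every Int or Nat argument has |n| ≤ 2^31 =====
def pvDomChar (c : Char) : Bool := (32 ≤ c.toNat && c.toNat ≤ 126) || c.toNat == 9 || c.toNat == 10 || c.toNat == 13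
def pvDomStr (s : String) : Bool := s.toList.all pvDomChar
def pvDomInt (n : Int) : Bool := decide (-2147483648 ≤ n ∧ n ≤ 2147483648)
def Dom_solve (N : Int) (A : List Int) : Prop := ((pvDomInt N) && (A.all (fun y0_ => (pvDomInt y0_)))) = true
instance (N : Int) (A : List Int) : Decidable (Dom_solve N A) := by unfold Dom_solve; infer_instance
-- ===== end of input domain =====

-- B replaces A's sort-and-merge of the per-index displacement intervals by a per-start reach
-- array and a single prefix-max sweep: no interval list is built or sorted (measured faster by a constant factor).

-- shared helper: max(A[x:y+1]) - min(A[x:y+1]); both Pythons contain this exact expression.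
-- (the slice is nonempty at every use below, where Python's max/min would raise on empty)
def blk (A : List Int) (s e : Int) : Int :=
  ((PySem.List.max? (PySem.List.slice A (some s) (some (e + 1))) (fun x => x)).getD 0)
    - ((PySem.List.min? (PySem.List.slice A (some s) (some (e + 1))) (fun x => x)).getD 0)

-- first-occurrence dict over the sorted copy (identical loop in both Pythons)
def firstDict (A : List Int) : PySem.Dict Int Int :=
  (PySem.List.enumerate (PySem.List.sorted A (fun x => x) false) 0).foldl
    (fun d p => if d.contains p.2 then d else d.insert p.2 p.1) PySem.Dict.empty

-- ===== PORT A =====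
-- intervals.append(sorted([i, first[a]])); first[a] always present (a ∈ SA), so getD is exact
def rawIntervals (A : List Int) : List (Int × Int) :=
  (PySem.List.enumerate A 0).foldl
    (fun acc p =>
      acc ++ [if p.1 ≤ (firstDict A).getD p.2 0 then (p.1, (firstDict A).getD p.2 0)
              else ((firstDict A).getD p.2 0, p.1)]) []

-- intervals.sort()  (lists of length 2 compare lexicographically)
def sortedIntervals (A : List Int) : List (Int × Int) :=
  PySem.List.sorted2 (rawIntervals A) (fun q => q.1) (fun q => q.2) false

-- body of the merge loop: 'if s > end: res += …; start, end = s, e' then 'end = max(end, e)'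
def mstep (A : List Int) (st : Int × Int × Int) (q : Int × Int) : Int × Int × Int :=
  let (res, start, en) := st
  let (res, start, en) :=
    if q.1 > en then (res + blk A start en, q.1, q.2) else (res, start, en)
  (res, start, max en q.2)

def solve (N : Int) (A : List Int) : Int :=
  match PySem.List.pyGet? (sortedIntervals A) 0 with
  | none => 0  -- IndexError on intervals[0] (A = []), excluded by Pre_solve
  | some (s0, e0) =>
    let st :=
      (PySem.List.slice (sortedIntervals A) (some 1) none).foldl (mstep A) (0, s0, e0)
    st.1 + blk A st.2.1 st.2.2

-- ===== PORT B =====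
-- M[s] = furthest index any displacement interval starting at s must cover;
-- 'M[lo] = hi' : lo is always in range (a first-occurrence index), where Python would raise otherwise
def buildM (A : List Int) : List Int :=
  (PySem.List.enumerate A 0).foldl
    (fun M p =>
      let f := (firstDict A).getD p.2 0
      let lo := if f < p.1 then f else p.1
      let hi := if f < p.1 then p.1 else f
      if hi > PySem.List.pyGetD M lo 0 then PySem.List.pySetD M lo hi else M)
    (PySem.List.pyRange 0 (PySem.List.len A) 1)

-- body of the sweep: bump the running reach, close a block when it equals the position
def bstep (A : List Int) (M : List Int) (st : Int × Int × Int) (p : Int) : Int × Int × Int :=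
  let (res, reach, bs) := st
  let reach := if PySem.List.pyGetD M p 0 > reach then PySem.List.pyGetD M p 0 else reach
  if reach = p then (res + blk A bs p, reach, p + 1) else (res, reach, bs)

def solve_alt (N : Int) (A : List Int) : Int :=
  let M := buildM A
  ((PySem.List.pyRange 0 (PySem.List.len A) 1).foldl (bstep A M) (0, 0, 0)).1

-- ===== PRECONDITION & SPEC =====
-- Pre_ excludes exactly the empty list, on which A raises IndexError (intervals[0]).
def Pre_solve (N : Int) (A : List Int) : Prop := A ≠ []
instance (N : Int) (A : List Int) : Decidable (Pre_solve N A) := by unfold Pre_solve; infer_instance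
def pvWitness_solve : Int × List Int := (3, [2, 0, 1])

def Spec_solve (N : Int) (A : List Int) (out : Int) : Prop := out = solve_alt N A
instance (N : Int) (A : List Int) (out : Int) : Decidable (Spec_solve N A out) := by unfold Spec_solve; infer_instance

-- ===== CLAIM (what is proved, stated in full; the proofs are below) =====
def Claim_equal_solve : Prop := ∀ (N : Int) (A : List Int), Dom_solve N A → Pre_solve N A → Spec_solve N A (solve N A)

-- ===== LEMMAS AND PROOFS =====

-- proof-side abbreviations
def pvF (A : List Int) (i : Nat) : Int := (firstDict A).getD (PySem.List.pyGetD A (i : Int) 0) 0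
def pvIvl (A : List Int) (i : Nat) : Int × Int := (min (i : Int) (pvF A i), max (i : Int) (pvF A i))
def pvIvs (A : List Int) : List (Int × Int) := (List.range A.length).map (pvIvl A)
def pvG (l : List (Int × Int)) (s : Int) : List (Int × Int) := l.filter (fun q => q.1 == s)
def pvEnfold (en : Int) (l : List (Int × Int)) : Int := l.foldl (fun e q => max e q.2) en
def pvMB (A : List Int) (s : Nat) : Int := pvEnfold (s : Int) (pvG (pvIvs A) (s : Int))
def pvRch (A : List Int) : Nat → Int
  | 0 => pvMB A 0
  | s + 1 => max (pvRch A s) (pvMB A (s + 1))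
def pvStepA (A : List Int) (s : Nat) (st : Int × Int × Int) : Int × Int × Int :=
  if (s : Int) > st.2.2 then (st.1 + blk A st.2.1 st.2.2, (s : Int), pvMB A s)
  else (st.1, st.2.1, max st.2.2 (pvMB A s))
def pvMachA (A : List Int) : Nat → Int × Int × Int
  | 0 => (0, 0, pvMB A 0)
  | s + 1 => pvStepA A (s + 1) (pvMachA A s)
def pvStepB (A : List Int) (s : Nat) (st : Int × Int × Int) : Int × Int × Int :=
  let r := max st.2.1 (pvMB A s)
  if r = (s : Int) then (st.1 + blk A st.2.2 (s : Int), r, (s : Int) + 1) else (st.1, r, st.2.2)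
def pvMachB (A : List Int) : Nat → Int × Int × Int
  | 0 => pvStepB A 0 (0, 0, 0)
  | s + 1 => pvStepB A (s + 1) (pvMachB A s)

-- [1] dict values are first-occurrence indices: 0 ≤ pvF < length
theorem pvDictVals (P : Int → Prop) :
    ∀ (l : List (Int × Int)) (d : PySem.Dict Int Int),
      (∀ k v, d.get? k = some v → P v) → (∀ p ∈ l, P p.1) →
      ∀ k v, ((l.foldl (fun d p => if d.contains p.2 then d else d.insert p.2 p.1) d).get? k = some v) → P v := by
  intro l
  induction l with
  | nil => intro d hd _ k v h; exact hd k v h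
  | cons p t ih =>
      intro d hd hl k v h
      simp only [List.foldl_cons] at h
      refine ih _ ?_ (fun p' hp' => hl p' (List.mem_cons_of_mem _ hp')) k v h
      intro k' v' h'
      by_cases hc : d.contains p.2
      · rw [if_pos hc] at h'; exact hd _ _ h'
      · rw [if_neg hc, PySem.Dict.get?_insert] at h'
        by_cases hk : k' = p.2
        · rw [if_pos hk] at h'
          cases h'
          exact hl p List.mem_cons_self
        · rw [if_neg hk] at h'
          exact hd _ _ h'

theorem pvF_bounds (A : List Int) (hA : A ≠ []) (i : Nat) :
    0 ≤ pvF A i ∧ pvF A i < (A.length : Int) := by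
  have hlen : 0 < A.length := List.length_pos_of_ne_nil hA
  unfold pvF
  cases hg : (firstDict A).get? (PySem.List.pyGetD A (i : Int) 0) with
  | none =>
      simp only [PySem.Dict.getD, hg, Option.getD_none]
      exact ⟨le_refl 0, by exact_mod_cast hlen⟩
  | some v =>
      simp only [PySem.Dict.getD, hg, Option.getD_some]
      refine pvDictVals (fun v => 0 ≤ v ∧ v < (A.length : Int)) _ _
        (fun k v h => by simp [PySem.Dict.get?_empty] at h) ?_ _ _ hg
      intro p hp
      rw [PySem.List.mem_enumerate_iff] at hp
      obtain ⟨k, hk, rfl⟩ := hp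
      rw [PySem.List.length_sorted] at hk
      have hk' : (k : Int) < (A.length : Int) := by exact_mod_cast hk
      constructor <;> simp <;> omega

-- [2] interval facts
theorem pvIvl_facts (A : List Int) (hA : A ≠ []) (i : Nat) (hi : i < A.length) :
    0 ≤ (pvIvl A i).1 ∧ (pvIvl A i).1 ≤ (i : Int) ∧ (i : Int) ≤ (pvIvl A i).2 ∧
      (pvIvl A i).2 < (A.length : Int) ∧ (pvIvl A i).1 ≤ (pvIvl A i).2 := by
  obtain ⟨h0, h1⟩ := pvF_bounds A hA i
  have hi' : (i : Int) < (A.length : Int) := by exact_mod_cast hi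
  simp only [pvIvl]
  refine ⟨?_, ?_, ?_, ?_, ?_⟩ <;> simp <;> omega

theorem pvMem_ivs (A : List Int) (q : Int × Int) :
    q ∈ pvIvs A ↔ ∃ i, i < A.length ∧ q = pvIvl A i := by
  simp only [pvIvs, List.mem_map, List.mem_range]
  constructor
  · rintro ⟨i, hi, rfl⟩; exact ⟨i, hi, rfl⟩
  · rintro ⟨i, hi, rfl⟩; exact ⟨i, hi, rfl⟩

-- [4] enfold toolbox
theorem pvEnfold_ge_init (en : Int) (l : List (Int × Int)) : en ≤ pvEnfold en l :=
  (PySem.List.le_foldl_max_int l (fun q => q.2) en).1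
theorem pvEnfold_ge_mem (en : Int) (l : List (Int × Int)) (q : Int × Int) (h : q ∈ l) :
    q.2 ≤ pvEnfold en l :=
  (PySem.List.le_foldl_max_int l (fun q => q.2) en).2 q h
theorem pvEnfold_max (a b : Int) (l : List (Int × Int)) :
    pvEnfold (max a b) l = max a (pvEnfold b l) := by
  induction l generalizing b with
  | nil => rfl
  | cons q t ih =>
      simp only [pvEnfold, List.foldl_cons] at *
      rw [max_assoc, ih]
theorem pvEnfold_le (c : Int) (l : List (Int × Int)) :
    ∀ en, (∀ q ∈ l, q.2 ≤ c) → en ≤ c → pvEnfold en l ≤ c := by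
  induction l with
  | nil => intro en _ he; exact he
  | cons q t ih =>
      intro en h he
      simp only [pvEnfold, List.foldl_cons]
      exact ih _ (fun q' hq' => h q' (List.mem_cons_of_mem _ hq'))
        (max_le he (h q List.mem_cons_self))
theorem pvEnfold_perm (en : Int) (l₁ l₂ : List (Int × Int)) (h : l₁.Perm l₂) :
    pvEnfold en l₁ = pvEnfold en l₂ := by
  haveI : RightCommutative (fun (e : Int) (q : Int × Int) => max e q.2) :=
    ⟨fun e a b => max_right_comm e a.2 b.2⟩
  exact h.foldl_eq en

-- [5] merge fold, no interval can close
theorem pvFold_noclose (A : List Int) (l : List (Int × Int)) :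
    ∀ (res start en : Int), (∀ q ∈ l, q.1 ≤ en) →
      l.foldl (mstep A) (res, start, en) = (res, start, pvEnfold en l) := by
  induction l with
  | nil => intro res start en _; rfl
  | cons q t ih =>
      intro res start en h
      have hq : ¬ q.1 > en := not_lt.mpr (h q List.mem_cons_self)
      simp only [List.foldl_cons, mstep, if_neg hq]
      exact ih res start (max en q.2)
        (fun q' hq' => le_trans (h q' (List.mem_cons_of_mem _ hq')) (le_max_left _ _))

-- [6] merge fold over one group with common start c
theorem pvFold_group (A : List Int) (g : List (Int × Int)) (c : Int) (hne : g ≠ [])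
    (h : ∀ q ∈ g, q.1 = c ∧ c ≤ q.2) (res start en : Int) :
    g.foldl (mstep A) (res, start, en) =
      if c > en then (res + blk A start en, c, pvEnfold c g) else (res, start, pvEnfold en g) := by
  match g with
  | [] => exact absurd rfl hne
  | q :: t =>
      obtain ⟨hq1, hq2⟩ := h q List.mem_cons_self
      have ht : ∀ q' ∈ t, q'.1 ≤ q.2 := fun q' hq' => by
        obtain ⟨h1, _⟩ := h q' (List.mem_cons_of_mem _ hq'); omega
      by_cases hc : c > en
      · have hcl : q.1 > en := hq1 ▸ hc
        simp only [List.foldl_cons, mstep, if_pos hcl, if_pos hc, max_self]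
        rw [pvFold_noclose A t _ _ _ ht]
        have : pvEnfold c (q :: t) = pvEnfold q.2 t := by
          simp only [pvEnfold, List.foldl_cons]
          rw [max_eq_right (hq1 ▸ hq2)]
        rw [this, hq1]
      · rw [if_neg hc]
        exact pvFold_noclose A (q :: t) res start en
          (fun q' hq' => by obtain ⟨h1, h2⟩ := h q' hq'; omega)

theorem pvRaw_eq_ivs (A : List Int) : rawIntervals A = pvIvs A := by
  unfold rawIntervals
  rw [PySem.List.foldl_append_singleton_eq_map, List.nil_append,
    PySem.List.enumerate_eq_map_pyRange A 0, List.map_map, PySem.List.pyRange_one]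
  simp only [PySem.List.len_eq, sub_zero, Int.toNat_natCast, List.map_map, pvIvs]
  refine List.map_congr_left ?_
  intro k _
  simp only [Function.comp_apply, zero_add, pvIvl]
  have hF : pvF A k = (firstDict A).getD (PySem.List.pyGetD A (k : Int) 0) 0 := rfl
  rw [← hF]
  by_cases h : (k : Int) ≤ pvF A k
  · rw [if_pos h, min_eq_left h, max_eq_right h]
  · rw [if_neg h, min_eq_right (le_of_not_ge h), max_eq_left (le_of_not_ge h)]


-- [7] sorted interval list facts
theorem pvSL_perm (A : List Int) : (sortedIntervals A).Perm (pvIvs A) := by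
  unfold sortedIntervals
  exact (PySem.List.sorted2_perm (rawIntervals A) _ _ false).trans
    (by rw [pvRaw_eq_ivs])
theorem pvInsertBy_pairwise (before : Int × Int → Int × Int → Bool)
    (hT : ∀ x y, before x y = true → x.1 ≤ y.1)
    (hF : ∀ x y, before x y = false → y.1 ≤ x.1) (x : Int × Int) :
    ∀ ys : List (Int × Int), ys.Pairwise (fun a b => a.1 ≤ b.1) →
      (PySem.List.insertBy before x ys).Pairwise (fun a b => a.1 ≤ b.1) := by
  intro ys
  induction ys with
  | nil => intro _; simp [PySem.List.insertBy]
  | cons y t ih =>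
      intro hp
      rw [List.pairwise_cons] at hp
      obtain ⟨hy, ht⟩ := hp
      by_cases hb : before x y = true
      · simp only [PySem.List.insertBy, if_pos hb]
        refine List.pairwise_cons.mpr ⟨?_, List.pairwise_cons.mpr ⟨hy, ht⟩⟩
        intro z hz
        rcases List.mem_cons.mp hz with heq | hz'
        · exact heq ▸ hT x y hb
        · exact le_trans (hT x y hb) (hy z hz')
      · simp only [PySem.List.insertBy, if_neg hb]
        refine List.pairwise_cons.mpr ⟨?_, ih ht⟩
        intro z hz
        rcases (PySem.List.mem_insertBy before x z t).mp hz with heq | hz'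
        · exact heq ▸ hF x y (by simpa using hb)
        · exact hy z hz'

theorem pvSL_pairwise (A : List Int) :
    (sortedIntervals A).Pairwise (fun a b => a.1 ≤ b.1) := by
  have hT : ∀ x y : Int × Int,
      (decide (x.1 < y.1) || !decide (y.1 < x.1) && decide (x.2 < y.2)) = true → x.1 ≤ y.1 := by
    intro x y h; simp at h; omega
  have hF : ∀ x y : Int × Int,
      (decide (x.1 < y.1) || !decide (y.1 < x.1) && decide (x.2 < y.2)) = false → y.1 ≤ x.1 := by
    intro x y h; simp at h; omega
  have hfold : ∀ (xs acc : List (Int × Int)), acc.Pairwise (fun a b => a.1 ≤ b.1) →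
      (xs.foldl (fun acc x => PySem.List.insertBy
        (fun a b => decide (a.1 < b.1) || !decide (b.1 < a.1) && decide (a.2 < b.2)) x acc) acc).Pairwise
        (fun a b => a.1 ≤ b.1) := by
    intro xs
    induction xs with
    | nil => intro acc h; exact h
    | cons x t ih =>
        intro acc h
        exact ih _ (pvInsertBy_pairwise _ hT hF x acc h)
  exact hfold (rawIntervals A) [] List.Pairwise.nil
theorem pvFilter_le_succ (l : List (Int × Int)) (c : Int)
    (h : l.Pairwise (fun a b => a.1 ≤ b.1)) :
    l.filter (fun q => decide (q.1 ≤ c + 1)) =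
      l.filter (fun q => decide (q.1 ≤ c)) ++ l.filter (fun q => q.1 == c + 1) := by
  induction l with
  | nil => rfl
  | cons q t ih =>
      rw [List.pairwise_cons] at h
      obtain ⟨hq, ht⟩ := h
      simp only [List.filter_cons]
      by_cases h1 : q.1 ≤ c
      · have h2 : q.1 ≤ c + 1 := by omega
        have h3 : ¬ q.1 = c + 1 := by omega
        simp [h1, h2, h3, ih ht]
      · by_cases h4 : q.1 = c + 1
        · have hnil : t.filter (fun q => decide (q.1 ≤ c)) = [] :=
            List.filter_eq_nil_iff.mpr (fun z hz => by
              have := hq z hz; simp; omega)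
          have h2 : q.1 ≤ c + 1 := by omega
          simp [h4, ih ht, hnil]
        · have h6 : c + 1 < q.1 := by omega
          have e1 : t.filter (fun q => decide (q.1 ≤ c + 1)) = [] :=
            List.filter_eq_nil_iff.mpr (fun z hz => by
              have := hq z hz; simp; omega)
          have e2 : t.filter (fun q => decide (q.1 ≤ c)) = [] :=
            List.filter_eq_nil_iff.mpr (fun z hz => by
              have := hq z hz; simp; omega)
          have e3 : t.filter (fun q : Int × Int => q.1 == c + 1) = [] :=
            List.filter_eq_nil_iff.mpr (fun z hz => by
              have := hq z hz; simp; omega)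
          simp [show ¬ q.1 ≤ c + 1 by omega, h1, h4, e1, e2, e3]

-- [7b] membership facts / group transfer
theorem pvSL_mem_facts (A : List Int) (hA : A ≠ []) (q : Int × Int)
    (h : q ∈ sortedIntervals A) :
    0 ≤ q.1 ∧ q.1 ≤ q.2 ∧ q.2 ≤ (A.length : Int) - 1 := by
  have hmem : q ∈ pvIvs A := (pvSL_perm A).mem_iff.mp h
  obtain ⟨i, hi, rfl⟩ := (pvMem_ivs A q).mp hmem
  obtain ⟨f1, f2, f3, f4, f5⟩ := pvIvl_facts A hA i hi
  exact ⟨f1, f5, by omega⟩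
theorem pvG_SL_perm (A : List Int) (c : Int) :
    (pvG (sortedIntervals A) c).Perm (pvG (pvIvs A) c) := (pvSL_perm A).filter _
theorem pvG_tail (A : List Int) (e : Int) (t : List (Int × Int))
    (hS : sortedIntervals A = (0, e) :: t) (c : Int) (hc : c ≠ 0) :
    pvG (sortedIntervals A) c = pvG t c := by
  simp only [pvG, hS, List.filter_cons]
  simp [Ne.symm hc]


-- [8] head of the sorted interval list
theorem pvSL_head (A : List Int) (hA : A ≠ []) :
    ∃ e t, sortedIntervals A = (0, e) :: t ∧ 0 ≤ e := by
  have hlen : 0 < A.length := List.length_pos_of_ne_nil hA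
  have hivs0 : pvIvl A 0 ∈ pvIvs A := (pvMem_ivs A _).mpr ⟨0, hlen, rfl⟩
  have h0fst : (pvIvl A 0).1 = 0 := by
    simp only [pvIvl]
    have := (pvF_bounds A hA 0).1
    simp; omega
  cases hS : sortedIntervals A with
  | nil =>
      exfalso
      have hp := pvSL_perm A
      rw [hS] at hp
      have hnil : pvIvs A = [] := hp.symm.eq_nil
      have : A.length = 0 := by
        have := congrArg List.length hnil
        simpa [pvIvs] using this
      omega
  | cons q t =>
      have hq : q ∈ sortedIntervals A := hS ▸ List.mem_cons_self
      obtain ⟨g1, g2, _⟩ := pvSL_mem_facts A hA q hq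
      have hmem0 : pvIvl A 0 ∈ q :: t := hS ▸ (pvSL_perm A).mem_iff.mpr hivs0
      have hpw := pvSL_pairwise A
      rw [hS, List.pairwise_cons] at hpw
      have hq0 : q.1 = 0 := by
        rcases List.mem_cons.mp hmem0 with heq | hmem'
        · rw [heq] at h0fst; exact h0fst
        · have := hpw.1 _ hmem'
          rw [h0fst] at this
          omega
      have hqeq : q = (0, q.2) := by
        obtain ⟨a, b⟩ := q
        simp only at hq0
        simp [hq0]
      exact ⟨q.2, t, by rw [← hqeq], by omega⟩

-- [9] solve in terms of the merge fold
theorem pvSolveA_eq (N : Int) (A : List Int) (e : Int) (t : List (Int × Int))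
    (hS : sortedIntervals A = (0, e) :: t) :
    solve N A = ((t.foldl (mstep A) (0, 0, e)).1 +
      blk A (t.foldl (mstep A) (0, 0, e)).2.1 (t.foldl (mstep A) (0, 0, e)).2.2) := by
  simp only [solve, hS, PySem.List.pyGet?_zero_cons, PySem.List.slice_from_one, List.tail_cons]

-- [10] reach facts
theorem pvMB_ge (A : List Int) (s : Nat) : (s : Int) ≤ pvMB A s :=
  pvEnfold_ge_init _ _
theorem pvRch_ge_MB (A : List Int) (u s : Nat) (h : u ≤ s) : pvMB A u ≤ pvRch A s := by
  induction s with
  | zero =>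
      have : u = 0 := by omega
      subst this; exact le_refl _
  | succ s ih =>
      rcases Nat.lt_or_ge u (s + 1) with h' | h'
      · exact le_trans (ih (by omega)) (le_max_left _ _)
      · have : u = s + 1 := by omega
        subst this
        exact le_max_right _ _
theorem pvRch_ge (A : List Int) (s : Nat) : (s : Int) ≤ pvRch A s :=
  le_trans (pvMB_ge A s) (pvRch_ge_MB A s s (le_refl s))
theorem pvMB_le (A : List Int) (hA : A ≠ []) (s : Nat) (hs : s < A.length) :
    pvMB A s ≤ (A.length : Int) - 1 := by
  refine pvEnfold_le _ _ _ ?_ (by omega)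
  intro q hq
  have hqm : q ∈ pvIvs A := (List.mem_filter.mp hq).1
  obtain ⟨i, hi, rfl⟩ := (pvMem_ivs A q).mp hqm
  have := (pvIvl_facts A hA i hi).2.2.2.1
  omega

theorem pvRch_le (A : List Int) (hA : A ≠ []) (s : Nat) (hs : s < A.length) :
    pvRch A s ≤ (A.length : Int) - 1 := by
  induction s with
  | zero => exact pvMB_le A hA 0 hs
  | succ s ih =>
      exact max_le (ih (by omega)) (pvMB_le A hA (s + 1) hs)
theorem pvK2 (A : List Int) (hA : A ≠ []) (s : Nat) (hs : s < A.length) (h1 : 1 ≤ s)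
    (hemp : pvG (pvIvs A) (s : Int) = []) : (s : Int) ≤ pvRch A (s - 1) := by
  have hmem : pvIvl A s ∈ pvIvs A := (pvMem_ivs A _).mpr ⟨s, hs, rfl⟩
  obtain ⟨f1, f2, f3, f4, f5⟩ := pvIvl_facts A hA s hs
  have hlo : (pvIvl A s).1 ≠ (s : Int) := by
    intro h
    have : pvIvl A s ∈ pvG (pvIvs A) (s : Int) :=
      List.mem_filter.mpr ⟨hmem, by simp [h]⟩
    rw [hemp] at this
    exact absurd this (List.not_mem_nil)
  set u : Nat := (pvIvl A s).1.toNat with hu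
  have hcast : (u : Int) = (pvIvl A s).1 := Int.toNat_of_nonneg f1
  have hus : u < s := by omega
  have hmemG : pvIvl A s ∈ pvG (pvIvs A) (u : Int) :=
    List.mem_filter.mpr ⟨hmem, by simp [hcast]⟩
  have h1 : (pvIvl A s).2 ≤ pvMB A u := pvEnfold_ge_mem _ _ _ hmemG
  have h2 : pvMB A u ≤ pvRch A (s - 1) := pvRch_ge_MB A u (s - 1) (by omega)
  omega
theorem pvMachA_en (A : List Int) (s : Nat) : (pvMachA A s).2.2 = pvRch A s := by
  induction s with
  | zero => rfl
  | succ s ih =>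
      simp only [pvMachA, pvStepA]
      by_cases h : ((s : Int) + 1) > (pvMachA A s).2.2
      · rw [if_pos (by push_cast; exact h)]
        have hmb := pvMB_ge A (s + 1)
        rw [ih] at h
        simp only [pvRch]
        have : pvRch A s ≤ pvMB A (s + 1) := by push_cast at hmb ⊢; omega
        rw [max_eq_right this]
      · rw [if_neg (by push_cast; exact h)]
        simp only [pvRch, ih]

-- [10b] the A-side fold equals the abstract machine
theorem pvFoldA_mach (A : List Int) (hA : A ≠ []) (e : Int) (t : List (Int × Int))
    (hS : sortedIntervals A = (0, e) :: t) :
    ∀ s, s < A.length →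
      (t.filter (fun q => decide (q.1 ≤ (s : Int)))).foldl (mstep A) (0, 0, e) = pvMachA A s := by
  have hpwS := pvSL_pairwise A
  rw [hS, List.pairwise_cons] at hpwS
  have hpw : t.Pairwise (fun a b => a.1 ≤ b.1) := hpwS.2
  have hhead : ((0 : Int), e) ∈ sortedIntervals A := hS ▸ List.mem_cons_self
  have he0 : 0 ≤ e := by
    have := pvSL_mem_facts A hA _ hhead
    simp at this
    omega
  have htmem : ∀ q ∈ t, q ∈ sortedIntervals A := fun q hq => hS ▸ List.mem_cons_of_mem _ hq
  intro s
  induction s with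
  | zero =>
      intro _
      have hcong : t.filter (fun q => decide (q.1 ≤ ((0 : Nat) : Int))) = pvG t 0 :=
        List.filter_congr (fun q hq => by
          have h0 := (pvSL_mem_facts A hA q (htmem q hq)).1
          by_cases h : q.1 = 0
          · simp [h]
          · simp [h, show ¬ q.1 ≤ 0 by omega])
      have hG0 : pvG (sortedIntervals A) 0 = (0, e) :: pvG t 0 := by
        simp [pvG, hS]
      have hMB0 : pvMB A 0 = pvEnfold e (pvG t 0) := by
        unfold pvMB
        rw [Nat.cast_zero, ← pvEnfold_perm 0 _ _ (pvG_SL_perm A 0), hG0]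
        simp only [pvEnfold, List.foldl_cons]
        rw [max_eq_right he0]
      rw [hcong]
      cases hGt : pvG t 0 with
      | nil =>
          have : pvMB A 0 = e := by rw [hMB0, hGt]; rfl
          simp [pvMachA, this]
      | cons q g =>
          rw [← hGt]
          rw [pvFold_group A _ 0 (by rw [hGt]; simp) ?memfacts 0 0 e]
          case memfacts =>
            intro q' hq'
            have h1 := List.mem_filter.mp hq'
            have h2 := pvSL_mem_facts A hA q' (htmem q' h1.1)
            have h3 : q'.1 = 0 := by simpa using h1.2
            exact ⟨h3, by omega⟩
          rw [if_neg (by omega), ← hMB0]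
          rfl
  | succ s ih =>
      intro hss
      have hs : s < A.length := by omega
      have hcast : ((s + 1 : Nat) : Int) = (s : Int) + 1 := by push_cast; ring
      rw [hcast, pvFilter_le_succ t (s : Int) hpw, List.foldl_append, ih hs]
      have hGeq : (t.filter (fun q => q.1 == (s : Int) + 1)) = pvG t ((s : Int) + 1) := rfl
      have hGSL : pvG (sortedIntervals A) ((s : Int) + 1) = pvG t ((s : Int) + 1) :=
        pvG_tail A e t hS _ (by omega)
      have hMBp : pvMB A (s + 1) = pvEnfold ((s : Int) + 1) (pvG t ((s : Int) + 1)) := by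
        unfold pvMB
        rw [hcast, ← pvEnfold_perm _ _ _ (pvG_SL_perm A ((s : Int) + 1)), hGSL]
      rcases hMA : pvMachA A s with ⟨ra, sa, ea⟩
      have hen : ea = pvRch A s := by rw [← pvMachA_en A s, hMA]
      rw [hGeq]
      by_cases hgnil : pvG t ((s : Int) + 1) = []
      · have hivsnil : pvG (pvIvs A) ((s : Int) + 1) = [] := by
          have hp := pvG_SL_perm A ((s : Int) + 1)
          rw [hGSL, hgnil] at hp
          exact hp.symm.eq_nil
        have hMB : pvMB A (s + 1) = (s : Int) + 1 := by rw [hMBp, hgnil]; rfl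
        have hrch : (s : Int) + 1 ≤ pvRch A s := by
          have := pvK2 A hA (s + 1) hss (by omega) (by rw [hcast]; exact hivsnil)
          rw [Nat.add_sub_cancel] at this
          omega
        rw [hgnil]
        simp only [List.foldl_nil, pvMachA, pvStepA, hMA]
        rw [if_neg (by simp; omega), hMB, max_eq_left (by omega)]
      · have hmemg : ∀ q ∈ pvG t ((s : Int) + 1), q.1 = (s : Int) + 1 ∧ (s : Int) + 1 ≤ q.2 := by
          intro q hq
          have h1 := List.mem_filter.mp hq
          have h2 := pvSL_mem_facts A hA q (htmem q h1.1)
          have h3 : q.1 = (s : Int) + 1 := by simpa using h1.2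
          exact ⟨h3, by omega⟩
        rw [pvFold_group A _ ((s : Int) + 1) hgnil hmemg ra sa ea]
        simp only [pvMachA, pvStepA, hMA]
        by_cases hcl : (s : Int) + 1 > ea
        · rw [if_pos hcl, if_pos (by simp; omega)]
          rw [hMBp, hcast]
        · rw [if_neg hcl, if_neg (by simp; omega)]
          have h1 : (s : Int) + 1 ≤ ea := by omega
          rw [hMBp, ← pvEnfold_max ea ((s : Int) + 1) _, max_eq_left h1]

-- [11] the B-side M array realises pvMB
def pvGG (A : List Int) (M : List Int) (k : Nat) : List Int :=
  if max (k : Int) (pvF A k) > PySem.List.pyGetD M (min (k : Int) (pvF A k)) 0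
  then PySem.List.pySetD M (min (k : Int) (pvF A k)) (max (k : Int) (pvF A k)) else M

theorem pvEnfold_append_singleton (en : Int) (l : List (Int × Int)) (q : Int × Int) :
    pvEnfold en (l ++ [q]) = max (pvEnfold en l) q.2 := by
  simp [pvEnfold, List.foldl_append]

theorem pvBuildM_eq (A : List Int) :
    buildM A = (List.range A.length).foldl (pvGG A) (PySem.List.pyRange 0 (PySem.List.len A) 1) := by
  unfold buildM
  rw [PySem.List.enumerate_eq_map_pyRange A 0, List.foldl_map, PySem.List.pyRange_one]
  simp only [PySem.List.len_eq, sub_zero, Int.toNat_natCast]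
  rw [List.foldl_map]
  refine PySem.List.foldl_congr_mem _ _ _ _ ?_
  intro M k _
  simp only [zero_add, pvGG, pvF]
  by_cases h : (firstDict A).getD (PySem.List.pyGetD A (k : Int) 0) 0 < (k : Int)
  · rw [min_eq_right (le_of_lt h), max_eq_left (le_of_lt h)]
    simp only [if_pos h]
  · rw [min_eq_left (le_of_not_gt h), max_eq_right (le_of_not_gt h)]
    simp only [if_neg h]

theorem pvBuildAux (A : List Int) (hA : A ≠ []) :
    ∀ k, k ≤ A.length →
      ((List.range k).foldl (pvGG A) (PySem.List.pyRange 0 (PySem.List.len A) 1)).length = A.length ∧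
      ∀ s : Nat, s < A.length →
        PySem.List.pyGetD ((List.range k).foldl (pvGG A) (PySem.List.pyRange 0 (PySem.List.len A) 1)) (s : Int) 0
          = pvEnfold (s : Int) (pvG ((List.range k).map (pvIvl A)) (s : Int)) := by
  intro k
  induction k with
  | zero =>
      intro _
      constructor
      · simp [PySem.List.length_pyRange_one, PySem.List.len_eq]
      · intro s hs
        simp only [List.range_zero, List.map_nil, List.foldl_nil]
        rw [PySem.List.pyRange_one]
        simp only [sub_zero, PySem.List.len_eq, Int.toNat_natCast]
        rw [PySem.List.pyGetD_natCast, PySem.List.getD_map_range _ _ _ _ hs]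
        simp [pvG, pvEnfold]
  | succ k ih =>
      intro hk1
      have hk : k < A.length := by omega
      obtain ⟨ihlen, ihget⟩ := ih (by omega)
      rw [List.range_succ, List.foldl_append]
      set Mk := (List.range k).foldl (pvGG A) (PySem.List.pyRange 0 (PySem.List.len A) 1) with hMk
      simp only [List.foldl_cons, List.foldl_nil]
      obtain ⟨f1, f2, f3, f4, f5⟩ := pvIvl_facts A hA k hk
      have hlo0 : 0 ≤ min (k : Int) (pvF A k) := f1
      have hlok : min (k : Int) (pvF A k) ≤ (k : Int) := f2
      set ln : Nat := (min (k : Int) (pvF A k)).toNat with hln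
      have hcast : (ln : Int) = min (k : Int) (pvF A k) := Int.toNat_of_nonneg hlo0
      have hlnlen : ln < A.length := by omega
      have hsplitG : ∀ s : Int, pvG (List.map (pvIvl A) (List.range k ++ [k])) s
          = pvG (List.map (pvIvl A) (List.range k)) s ++
            (if (pvIvl A k).1 == s then [pvIvl A k] else []) := by
        intro s
        simp [pvG, List.filter_append, List.filter_cons]
      constructor
      · unfold pvGG
        split
        · rw [PySem.List.length_pySetD]; exact ihlen
        · exact ihlen
      · intro s hs
        rw [hsplitG (s : Int)]
        unfold pvGG
        by_cases hup : max (k : Int) (pvF A k) > PySem.List.pyGetD Mk (min (k : Int) (pvF A k)) 0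
        · rw [if_pos hup, ← hcast,
            PySem.List.pyGetD_pySetD_natCast Mk ln s _ 0 (ihlen ▸ hlnlen)]
          by_cases hseq : s = ln
          · have hseq' : (s : Int) = min (k : Int) (pvF A k) := by rw [hseq, hcast]
            rw [if_pos hseq]
            have hcond : ((pvIvl A k).1 == (s : Int)) = true := by
              simp only [pvIvl]
              simp [hseq']
            rw [hcond, if_pos rfl]
            rw [pvEnfold_append_singleton, ← ihget s hs]
            simp only [pvIvl]
            exact (max_eq_right (by rw [hseq']; exact le_of_lt hup)).symm
          · rw [if_neg hseq]
            have hcond : ((pvIvl A k).1 == (s : Int)) = false := by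
              simp only [pvIvl]
              rw [← hcast]
              simp [Nat.cast_inj]
              omega
            rw [hcond, if_neg (by simp)]
            rw [List.append_nil]
            exact ihget s hs
        · rw [if_neg hup]
          by_cases hseq : s = ln
          · have hseq' : (s : Int) = min (k : Int) (pvF A k) := by rw [hseq, hcast]
            have hcond : ((pvIvl A k).1 == (s : Int)) = true := by
              simp only [pvIvl]
              simp [hseq']
            rw [hcond, if_pos rfl]
            rw [pvEnfold_append_singleton, ← ihget s hs]
            simp only [pvIvl]
            exact (max_eq_left (by rw [hseq']; exact not_lt.mp hup)).symm
          · have hcond : ((pvIvl A k).1 == (s : Int)) = false := by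
              simp only [pvIvl]
              rw [← hcast]
              simp [Nat.cast_inj]
              omega
            rw [hcond, if_neg (by simp)]
            rw [List.append_nil]
            exact ihget s hs

theorem pvBuildM_char (A : List Int) (hA : A ≠ []) (s : Nat) (hs : s < A.length) :
    PySem.List.pyGetD (buildM A) (s : Int) 0 = pvMB A s := by
  rw [pvBuildM_eq]
  exact (pvBuildAux A hA A.length (le_refl _)).2 s hs

-- [12] the B-side sweep equals the abstract machine
theorem pvBstep_eq (A : List Int) (hA : A ≠ []) (p : Nat) (hp : p < A.length)
    (st : Int × Int × Int) : bstep A (buildM A) st (p : Int) = pvStepB A p st := by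
  rcases st with ⟨res, reach, bs⟩
  simp only [bstep, pvStepB, pvBuildM_char A hA p hp]
  have hmax : (if pvMB A p > reach then pvMB A p else reach) = max reach (pvMB A p) := by
    by_cases h : pvMB A p ≤ reach
    · rw [if_neg (not_lt.mpr h), max_eq_left h]
    · rw [if_pos (lt_of_not_ge h), max_eq_right (le_of_not_ge h)]
  rw [hmax]

theorem pvSweep_mach (A : List Int) (hA : A ≠ []) (s : Nat) (hs : s < A.length) :
    (PySem.List.pyRange 0 ((s : Int) + 1) 1).foldl (bstep A (buildM A)) (0, 0, 0) = pvMachB A s := by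
  induction s with
  | zero =>
      rw [Nat.cast_zero, PySem.List.pyRange_one_singleton]
      have h := pvBstep_eq A hA 0 hs (0, 0, 0)
      rw [Nat.cast_zero] at h
      simp only [List.foldl_cons, List.foldl_nil, pvMachB]
      exact h
  | succ s ih =>
      have hs' : s < A.length := by omega
      have hc : ((s + 1 : Nat) : Int) = (s : Int) + 1 := by push_cast; ring
      rw [hc, PySem.List.pyRange_one_succ_right (by omega), List.foldl_append, ih hs']
      simp only [List.foldl_cons, List.foldl_nil]
      rw [← hc, pvBstep_eq A hA (s + 1) hs (pvMachB A s)]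
      simp only [pvMachB]

theorem pvMachB_reach (A : List Int) (s : Nat) : (pvMachB A s).2.1 = pvRch A s := by
  induction s with
  | zero =>
      have h0 : max (0 : Int) (pvMB A 0) = pvMB A 0 :=
        max_eq_right (by have := pvMB_ge A 0; simpa using this)
      simp only [pvMachB, pvStepB, h0]
      split <;> simp [pvRch]
  | succ s ih =>
      simp only [pvMachB, pvStepB, ih]
      split <;> simp [pvRch]

-- [13] step-by-step correspondence of the two machines
theorem pvCorr (A : List Int) (hA : A ≠ []) :
    ∀ s, s < A.length →
      (if pvRch A s = (s : Int)
       then (pvMachB A s).2.2 = (s : Int) + 1 ∧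
            (pvMachB A s).1 = (pvMachA A s).1 + blk A (pvMachA A s).2.1 (s : Int)
       else (pvMachB A s).2.2 = (pvMachA A s).2.1 ∧ (pvMachB A s).1 = (pvMachA A s).1) := by
  intro s
  induction s with
  | zero =>
      intro _
      have h0 : max (0 : Int) (pvMB A 0) = pvMB A 0 :=
        max_eq_right (by have := pvMB_ge A 0; simpa using this)
      have hrch0 : pvRch A 0 = pvMB A 0 := rfl
      simp only [pvMachB, pvMachA, pvStepB, h0, Nat.cast_zero]
      by_cases h : pvMB A 0 = (0 : Int)
      · rw [if_pos (by rw [hrch0]; exact h), if_pos h]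
        exact ⟨rfl, rfl⟩
      · rw [if_neg (by rw [hrch0]; exact h), if_neg h]
        exact ⟨rfl, rfl⟩
  | succ s ih =>
      intro hss
      have hs : s < A.length := by omega
      have ihs := ih hs
      have hc : ((s + 1 : Nat) : Int) = (s : Int) + 1 := by push_cast; ring
      rcases hA' : pvMachA A s with ⟨ra, sa, ea⟩
      rcases hB' : pvMachB A s with ⟨rb, rc, bs⟩
      rw [hA', hB'] at ihs
      have hea : ea = pvRch A s := by rw [← pvMachA_en A s, hA']
      have hrc : rc = pvRch A s := by rw [← pvMachB_reach A s, hB']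
      have hMBge : ((s : Int) + 1) ≤ pvMB A (s + 1) := by
        have := pvMB_ge A (s + 1); rw [hc] at this; exact this
      have hrchge : (s : Int) ≤ pvRch A s := pvRch_ge A s
      have hrchsucc : pvRch A (s + 1) = max (pvRch A s) (pvMB A (s + 1)) := rfl
      have hAeval : pvMachA A (s + 1) = pvStepA A (s + 1) (ra, sa, ea) := by
        simp only [pvMachA, hA']
      have hBeval : pvMachB A (s + 1) = pvStepB A (s + 1) (rb, rc, bs) := by
        simp only [pvMachB, hB']
      by_cases hcl : pvRch A s = (s : Int)
      · rw [if_pos hcl] at ihs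
        obtain ⟨hbs, hrb⟩ := ihs
        simp only at hbs hrb
        have hstA : pvStepA A (s + 1) (ra, sa, ea) =
            (ra + blk A sa ea, ((s + 1 : Nat) : Int), pvMB A (s + 1)) := by
          simp only [pvStepA]
          rw [if_pos (show ((s + 1 : Nat) : Int) > ea by rw [hea, hcl, hc]; omega)]
        have hr : max rc (pvMB A (s + 1)) = pvMB A (s + 1) :=
          max_eq_right (by rw [hrc, hcl]; omega)
        have hr2 : pvRch A (s + 1) = pvMB A (s + 1) := by
          rw [hrchsucc, hcl]
          exact max_eq_right (by omega)
        by_cases hc2 : pvRch A (s + 1) = ((s + 1 : Nat) : Int)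
        · rw [if_pos hc2]
          have hstB : pvStepB A (s + 1) (rb, rc, bs) =
              (rb + blk A bs ((s + 1 : Nat) : Int), pvMB A (s + 1), ((s + 1 : Nat) : Int) + 1) := by
            simp only [pvStepB, hr]
            rw [if_pos (by rw [← hr2]; exact hc2)]
          rw [hBeval, hstB, hAeval, hstA]
          refine ⟨rfl, ?_⟩
          simp only
          rw [hrb, hbs, hea, hcl, hc]
        · rw [if_neg hc2]
          have hstB : pvStepB A (s + 1) (rb, rc, bs) = (rb, pvMB A (s + 1), bs) := by
            simp only [pvStepB, hr]
            rw [if_neg (by rw [← hr2]; exact hc2)]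
          rw [hBeval, hstB, hAeval, hstA]
          refine ⟨by simp only; rw [hbs, hc], ?_⟩
          simp only
          rw [hrb, hea, hcl]
      · rw [if_neg hcl] at ihs
        obtain ⟨hbs, hrb⟩ := ihs
        simp only at hbs hrb
        have hgt : (s : Int) < pvRch A s := lt_of_le_of_ne hrchge (Ne.symm hcl)
        have hstA : pvStepA A (s + 1) (ra, sa, ea) =
            (ra, sa, max ea (pvMB A (s + 1))) := by
          simp only [pvStepA]
          rw [if_neg (show ¬ ((s + 1 : Nat) : Int) > ea by rw [hea, hc]; omega)]
        have hr : max rc (pvMB A (s + 1)) = pvRch A (s + 1) := by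
          rw [hrc, hrchsucc]
        by_cases hc2 : pvRch A (s + 1) = ((s + 1 : Nat) : Int)
        · rw [if_pos hc2]
          have hstB : pvStepB A (s + 1) (rb, rc, bs) =
              (rb + blk A bs ((s + 1 : Nat) : Int), pvRch A (s + 1), ((s + 1 : Nat) : Int) + 1) := by
            simp only [pvStepB, hr]
            rw [if_pos hc2]
          rw [hBeval, hstB, hAeval, hstA]
          refine ⟨rfl, ?_⟩
          simp only
          rw [hrb, hbs]
        · rw [if_neg hc2]
          have hstB : pvStepB A (s + 1) (rb, rc, bs) = (rb, pvRch A (s + 1), bs) := by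
            simp only [pvStepB, hr]
            rw [if_neg hc2]
          rw [hBeval, hstB, hAeval, hstA]
          exact ⟨hbs, hrb⟩

-- ===== VERDICT (by name: the statement is the Claim_ definition above) =====
theorem solve_spec : Claim_equal_solve := by
  intro N A _ hpre
  unfold Spec_solve
  have hA : A ≠ [] := hpre
  have hlen : 0 < A.length := List.length_pos_of_ne_nil hA
  obtain ⟨e, t, hS, he⟩ := pvSL_head A hA
  have hn1 : A.length - 1 < A.length := by omega
  have hall : t.filter (fun q => decide (q.1 ≤ ((A.length - 1 : Nat) : Int))) = t := by
    rw [List.filter_eq_self]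
    intro q hq
    have hmem : q ∈ sortedIntervals A := hS ▸ List.mem_cons_of_mem _ hq
    have := pvSL_mem_facts A hA q hmem
    simp
    omega
  have hfoldA := pvFoldA_mach A hA e t hS (A.length - 1) hn1
  rw [hall] at hfoldA
  rw [pvSolveA_eq N A e t hS, hfoldA]
  have hBalt : solve_alt N A =
      ((PySem.List.pyRange 0 (PySem.List.len A) 1).foldl (bstep A (buildM A)) (0, 0, 0)).1 := rfl
  have hlenint : PySem.List.len A = ((A.length - 1 : Nat) : Int) + 1 := by
    rw [PySem.List.len_eq]; omega
  rw [hBalt, hlenint, pvSweep_mach A hA (A.length - 1) hn1]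
  have hrch : pvRch A (A.length - 1) = ((A.length - 1 : Nat) : Int) := by
    refine le_antisymm ?_ (pvRch_ge A (A.length - 1))
    have := pvRch_le A hA (A.length - 1) hn1
    omega
  have hcorr := pvCorr A hA (A.length - 1) hn1
  rw [if_pos hrch] at hcorr
  obtain ⟨_, h1⟩ := hcorr
  rw [h1, pvMachA_en A (A.length - 1), hrch]
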